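-- pv_equiv track=rewrite | github.com/hieunq95/my-rl | experiments/block_fl_nsteps_sarsa.py | to_scalar_state
-- ===== SOURCE A (Python) =====
-- def to_scalar_state(state, order):
--     s = 0
--     for i in range(len(state)):
--         if i < len(state):
--             s += state[i] * order**(len(state) - i - 1)
--         else:
--             s += state[i]
--     return s
-- ===== SOURCE B (Python) =====
-- def to_scalar_state(state, order):
--     s = 0
--     for x in state:
--         s = s * order + x
--     return s
-- ===== Notes on version B (the rewrite author's own statement) =====
-- stated objective: faster
-- what changed: Replaced the per-index sum with order**(n-i-1) powers (Python ** recomputes each power) by a single-pass Horner evaluation s = s*order + x.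
import Mathlib
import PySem

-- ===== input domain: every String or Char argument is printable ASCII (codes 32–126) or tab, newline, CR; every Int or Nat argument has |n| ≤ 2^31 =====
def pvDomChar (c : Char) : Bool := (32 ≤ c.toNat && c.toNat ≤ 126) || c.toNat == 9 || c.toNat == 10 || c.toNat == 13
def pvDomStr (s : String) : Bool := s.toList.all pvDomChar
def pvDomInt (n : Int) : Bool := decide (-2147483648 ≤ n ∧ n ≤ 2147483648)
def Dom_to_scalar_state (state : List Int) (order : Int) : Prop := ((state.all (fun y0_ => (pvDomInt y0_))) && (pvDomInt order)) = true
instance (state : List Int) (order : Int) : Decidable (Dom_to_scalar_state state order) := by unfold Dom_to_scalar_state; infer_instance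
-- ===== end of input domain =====

-- B replaces A's per-index sum of state[i]*order**(n-i-1) with a one-pass Horner evaluation.

-- ===== PORT A =====
-- loop 'for i in range(len(state))'; indices are always in range, so state[i] is List.getD
-- (the 'else' branch is dead in Python too but is kept).
def to_scalar_state (state : List Int) (order : Int) : Int :=
  (List.range state.length).foldl
    (fun s i =>
      if i < state.length then
        s + state.getD i 0 * order ^ (state.length - i - 1)
      else
        s + state.getD i 0)
    0

-- ===== PORT B =====
def to_scalar_state_alt (state : List Int) (order : Int) : Int :=
  state.foldl (fun s x => s * order + x) 0

-- ===== PRECONDITION & SPEC =====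
def Spec_to_scalar_state (state : List Int) (order : Int) (out : Int) : Prop := out = to_scalar_state_alt state order
instance (state : List Int) (order : Int) (out : Int) : Decidable (Spec_to_scalar_state state order out) := by unfold Spec_to_scalar_state; infer_instance

-- ===== CLAIM (what is proved, stated in full; the proofs are below) =====
def Claim_equal_to_scalar_state : Prop := ∀ (state : List Int) (order : Int), Dom_to_scalar_state state order → Spec_to_scalar_state state order (to_scalar_state state order)

-- ===== LEMMAS AND PROOFS =====

-- canonical value: sum of state[i] * order ^ (n-1-i)
def pvSum (state : List Int) (order : Int) : Int :=
  match state with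
  | [] => 0
  | x :: xs => x * order ^ xs.length + pvSum xs order

theorem altFold_eq (xs : List Int) (order acc : Int) :
    xs.foldl (fun s x => s * order + x) acc = acc * order ^ xs.length + pvSum xs order := by
  induction xs generalizing acc with
  | nil => simp [pvSum]
  | cons x xs ih =>
    simp only [List.foldl, pvSum, List.length_cons, ih (acc * order + x)]
    ring

theorem aFold_eq (xs : List Int) (order acc : Int) :
    (List.range xs.length).foldl
      (fun s i =>
        if i < xs.length then
          s + xs.getD i 0 * order ^ (xs.length - i - 1)
        else
          s + xs.getD i 0) acc = acc + pvSum xs order := by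
  induction xs generalizing acc with
  | nil => simp [pvSum]
  | cons x xs ih =>
    have hfun :
        (fun (s : Int) (i : ℕ) =>
          if i.succ < xs.length + 1 then
            s + (x :: xs).getD i.succ 0 * order ^ (xs.length + 1 - i.succ - 1)
          else
            s + (x :: xs).getD i.succ 0)
        = (fun (s : Int) (i : ℕ) =>
          if i < xs.length then
            s + xs.getD i 0 * order ^ (xs.length - i - 1)
          else
            s + xs.getD i 0) := by
      funext s i
      simp [List.getD, Nat.succ_sub_succ]
    calc
      (List.range (x :: xs).length).foldl
        (fun s i =>
          if i < (x :: xs).length then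
            s + (x :: xs).getD i 0 * order ^ ((x :: xs).length - i - 1)
          else
            s + (x :: xs).getD i 0) acc
        = (List.range xs.length).foldl
            (fun s i =>
              if i < xs.length then
                s + xs.getD i 0 * order ^ (xs.length - i - 1)
              else
                s + xs.getD i 0)
            (acc + x * order ^ xs.length) := by
          simp only [List.length_cons, List.range_succ_eq_map, List.foldl_cons, List.foldl_map]
          rw [hfun]
          congr 1
      _ = acc + x * order ^ xs.length + pvSum xs order := ih _
      _ = acc + pvSum (x :: xs) order := by simp [pvSum]; ring

-- ===== VERDICT (by name: the statement is the Claim_ definition above) =====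
theorem to_scalar_state_spec : Claim_equal_to_scalar_state := by
  intro state order _
  show to_scalar_state state order = to_scalar_state_alt state order
  rw [to_scalar_state, to_scalar_state_alt, aFold_eq, altFold_eq]
  simp
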